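-- pv_equiv track=rewrite | github.com/janoliver/cash | cash/nodeset.py | get_line_numbers_concat
-- ===== SOURCE A (Python) =====
-- def get_line_numbers_concat(number_list, digits):
--     # from https://stackoverflow.com/questions/29418693/write-ranges-of-numbers-with-dashes/29418827
--     number_list = sorted(number_list)
--     seq = []
--     final = []
--     last = 0
--
--     for index, val in enumerate(number_list):
--
--         if last + 1 == val or index == 0:
--             seq.append(val)
--             last = val
--         else:
--             if len(seq) > 1:
--                 final.append(str(seq[0]).zfill(digits) + '-' + str(seq[len(seq) - 1]).zfill(digits))
--             else:
--                 final.append(str(seq[0]).zfill(digits))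
--             seq = []
--             seq.append(val)
--             last = val
--
--         if index == len(number_list) - 1:
--             if len(seq) > 1:
--                 final.append(str(seq[0]).zfill(digits) + '-' + str(seq[len(seq) - 1]).zfill(digits))
--             else:
--                 final.append(str(seq[0]).zfill(digits))
--
--     final_str = ','.join(map(str, final))
--     return final_str
-- ===== SOURCE B (Python) =====
-- def get_line_numbers_concat(number_list, digits):
--     # Boundary-detection: run starts and run ends are found independently from
--     # adjacent pairs of the sorted list, then zipped; no run-merging accumulator.
--     ys = sorted(number_list)
--     if not ys:
--         return ''
--     pairs = list(zip(ys, ys[1:]))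
--     starts = [ys[0]] + [b for a, b in pairs if b != a + 1]
--     ends = [a for a, b in pairs if b != a + 1] + [ys[-1]]
--     return ','.join(str(a).zfill(digits) if a == b
--                     else str(a).zfill(digits) + '-' + str(b).zfill(digits)
--                     for a, b in zip(starts, ends))
-- ===== Notes on version B (the rewrite author's own statement) =====
-- stated objective: simpler
-- what changed: Replaces A's stateful run-merging pass (seq buffer, last=0 sentinel, index==0 and trailing index==len-1 flush checks) with boundary detection: run starts and run ends are each computed independently by filtering adjacent pairs of the sorted list, then zipped and formatted.
import Mathlib
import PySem

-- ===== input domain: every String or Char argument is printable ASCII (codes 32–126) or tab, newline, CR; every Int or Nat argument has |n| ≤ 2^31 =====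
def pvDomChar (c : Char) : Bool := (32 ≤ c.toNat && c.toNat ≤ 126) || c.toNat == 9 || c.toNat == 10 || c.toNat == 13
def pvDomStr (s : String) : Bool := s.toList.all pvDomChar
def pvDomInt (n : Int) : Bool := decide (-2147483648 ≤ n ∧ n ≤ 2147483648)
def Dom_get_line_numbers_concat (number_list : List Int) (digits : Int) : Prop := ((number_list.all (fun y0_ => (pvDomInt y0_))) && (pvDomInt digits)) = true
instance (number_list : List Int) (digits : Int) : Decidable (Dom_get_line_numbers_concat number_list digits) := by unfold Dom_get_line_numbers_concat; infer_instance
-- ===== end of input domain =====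

-- B replaces A's stateful run-merging pass (seq buffer, last=0 sentinel, trailing-index flush)
-- with boundary detection: run starts and run ends are computed independently from adjacent
-- pairs of the sorted list and zipped together (objective: simpler).

-- ===== PORT A =====
-- A's flush of `seq` into a formatted string; at every call site in A, `seq` is nonempty,
-- so the pyGetD defaults are never reached (they stand for seq[0] / seq[len(seq)-1]).
def pvFlushA (seq : List Int) (digits : Int) : String :=
  if 1 < seq.length then
    PySem.Str.zfill (PySem.Int.toStr (PySem.List.pyGetD seq 0 0)) digits ++ "-" ++
      PySem.Str.zfill (PySem.Int.toStr (PySem.List.pyGetD seq ((seq.length : Int) - 1) 0)) digits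
  else
    PySem.Str.zfill (PySem.Int.toStr (PySem.List.pyGetD seq 0 0)) digits

-- loop body of A, extracted as a helper (state = (seq, final, last), item = (index, val))
def pvStepA (digits n : Int) (st : List Int × List String × Int) (iv : Int × Int) :
    List Int × List String × Int :=
  let seq := st.1; let final := st.2.1; let last := st.2.2
  let index := iv.1; let val := iv.2
  let st' :=
    if last + 1 = val ∨ index = 0 then (seq ++ [val], final, val)
    else ([val], final ++ [pvFlushA seq digits], val)
  if index = n - 1 then (st'.1, st'.2.1 ++ [pvFlushA st'.1 digits], st'.2.2)
  else st'

def get_line_numbers_concat (number_list : List Int) (digits : Int) : String :=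
  let ys := PySem.List.sorted number_list (fun x => x)
  let st := (PySem.List.enumerate ys).foldl (pvStepA digits (ys.length : Int)) ([], [], 0)
  PySem.Str.join "," st.2.1

-- ===== PORT B =====
def pvFmt (digits : Int) (p : Int × Int) : String :=
  if p.1 = p.2 then PySem.Str.zfill (PySem.Int.toStr p.1) digits
  else PySem.Str.zfill (PySem.Int.toStr p.1) digits ++ "-" ++
         PySem.Str.zfill (PySem.Int.toStr p.2) digits

def get_line_numbers_concat_alt (number_list : List Int) (digits : Int) : String :=
  let ys := PySem.List.sorted number_list (fun x => x)
  if ys.isEmpty then "" else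
  let pairs := ys.zip (PySem.List.slice ys (some 1) none)
  let breaks := pairs.filter (fun p => p.2 != p.1 + 1)
  let starts := [PySem.List.pyGetD ys 0 0] ++ breaks.map Prod.snd
  let ends := breaks.map Prod.fst ++ [PySem.List.pyGetD ys (-1) (0 : Int)]
  PySem.Str.join "," ((starts.zip ends).map (pvFmt digits))

-- ===== PRECONDITION & SPEC =====
def Spec_get_line_numbers_concat (number_list : List Int) (digits : Int) (out : String) : Prop := out = get_line_numbers_concat_alt number_list digits
instance (number_list : List Int) (digits : Int) (out : String) : Decidable (Spec_get_line_numbers_concat number_list digits out) := by unfold Spec_get_line_numbers_concat; infer_instance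

-- ===== CLAIM (what is proved, stated in full; the proofs are below) =====
def Claim_equal_get_line_numbers_concat : Prop := ∀ (number_list : List Int) (digits : Int), Dom_get_line_numbers_concat number_list digits → Spec_get_line_numbers_concat number_list digits (get_line_numbers_concat number_list digits)

-- ===== LEMMAS AND PROOFS =====

-- the list of runs contributed by the rest of the input, given the current run (a, b)
def pvRunsGo (a b : Int) : List Int → List (Int × Int)
  | [] => [(a, b)]
  | v :: tl => if b + 1 = v then pvRunsGo a v tl else (a, b) :: pvRunsGo v v tl

-- the break pairs of (b :: tl), recursively
def pvFB (b : Int) : List Int → List (Int × Int)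
  | [] => []
  | v :: r => (if b + 1 = v then [] else [(b, v)]) ++ pvFB v r

-- the last element of (b :: tl), recursively
def pvLast (b : Int) : List Int → Int
  | [] => b
  | v :: r => pvLast v r

lemma pvLast_eq_getLast : ∀ (tl : List Int) (b : Int),
    (b :: tl).getLast (List.cons_ne_nil b tl) = pvLast b tl := by
  intro tl
  induction tl with
  | nil => intro b; rfl
  | cons v r ih => intro b; rw [pvLast, ← ih v]; simp

lemma pvZipFilter_eq_FB : ∀ (tl : List Int) (b : Int),
    ((b :: tl).zip tl).filter (fun p => p.2 != p.1 + 1) = pvFB b tl := by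
  intro tl
  induction tl with
  | nil => intro b; rfl
  | cons v r ih =>
    intro b
    show ((b, v) :: (v :: r).zip r).filter (fun p => p.2 != p.1 + 1) = pvFB b (v :: r)
    rw [List.filter_cons, ih v, pvFB]
    by_cases h : b + 1 = v
    · simp [h]
    · have : v ≠ b + 1 := fun e => h e.symm
      simp [h, this]

-- zipping the independently-found starts and ends yields exactly the runs
lemma pvZipRuns : ∀ (tl : List Int) (a b : Int),
    ((a :: (pvFB b tl).map Prod.snd).zip ((pvFB b tl).map Prod.fst ++ [pvLast b tl]))
      = pvRunsGo a b tl := by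
  intro tl
  induction tl with
  | nil => intro a b; rfl
  | cons v r ih =>
    intro a b
    rw [pvFB, pvLast, pvRunsGo]
    by_cases h : b + 1 = v
    · rw [if_pos h, if_pos h, List.nil_append]
      exact ih a v
    · rw [if_neg h, if_neg h, List.singleton_append, List.map_cons, List.map_cons,
          List.cons_append, List.zip_cons_cons, ih v v]

-- invariant of A's `seq` during a run from a to b
def pvInv (seq : List Int) (a b : Int) : Prop :=
  seq.head? = some a ∧ seq.getLast? = some b ∧ a ≤ b ∧ (1 < seq.length ↔ a ≠ b)

lemma pvFlushA_eq {seq : List Int} {a b : Int} (h : pvInv seq a b) (digits : Int) :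
    pvFlushA seq digits = pvFmt digits (a, b) := by
  obtain ⟨h1, h2, h3, h4⟩ := h
  have hne : seq ≠ [] := by intro e; simp [e] at h1
  have hlen : 0 < seq.length := List.length_pos_iff.mpr hne
  have hget0 : PySem.List.pyGetD seq 0 0 = a := by
    rw [PySem.List.pyGetD_eq_getElem seq 0 (by omega) (by exact_mod_cast hlen)]
    have := List.head?_eq_getElem? (l := seq)
    rw [h1] at this
    have h0 : seq[0]? = some a := this.symm
    simpa using (List.getElem?_eq_some_iff.mp h0).2.symm ▸ rfl
  have hgetL : PySem.List.pyGetD seq ((seq.length : Int) - 1) 0 = b := by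
    rw [PySem.List.pyGetD_eq_getElem seq 0 (by omega) (by omega)]
    have := List.getLast?_eq_getElem? (l := seq)
    rw [h2] at this
    have hL : seq[seq.length - 1]? = some b := this.symm
    have := (List.getElem?_eq_some_iff.mp hL).2
    have htn : ((seq.length : Int) - 1).toNat = seq.length - 1 := by omega
    simp [htn, this]
  by_cases hab : a = b
  · have : ¬ 1 < seq.length := by rw [h4]; simp [hab]
    simp [pvFlushA, pvFmt, this, hget0, hab]
  · have : 1 < seq.length := h4.mpr hab
    simp [pvFlushA, pvFmt, this, hget0, hgetL, hab]

lemma pvInv_extend {seq : List Int} {a b : Int} (h : pvInv seq a b) :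
    pvInv (seq ++ [b + 1]) a (b + 1) := by
  obtain ⟨h1, h2, h3, h4⟩ := h
  have hne : seq ≠ [] := by intro e; simp [e] at h1
  refine ⟨?_, by simp, by omega, ?_⟩
  · rw [List.head?_append_of_ne_nil _ hne]; exact h1
  · constructor
    · intro _; omega
    · intro _; have := List.length_pos_iff.mpr hne; simp; omega

lemma pvInv_single (v : Int) : pvInv [v] v v := by
  refine ⟨rfl, rfl, le_refl v, ?_⟩; simp

def pvPending (digits a b : Int) (rest : List Int) : List String :=
  if rest.isEmpty then [] else (pvRunsGo a b rest).map (pvFmt digits)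

lemma pvEnum_cons (x : Int) (t : List Int) (k : Int) :
    PySem.List.enumerate (x :: t) k = (k, x) :: PySem.List.enumerate t (k + 1) := by
  simp [PySem.List.enumerate]

lemma pvLoopA_go (digits n : Int) : ∀ (rest : List Int) (k : Int) (seq : List Int)
    (fs : List String) (a b : Int), pvInv seq a b → k + (rest.length : Int) = n → 1 ≤ k →
    ((PySem.List.enumerate rest k).foldl (pvStepA digits n) (seq, fs, b)).2.1
      = fs ++ pvPending digits a b rest := by
  intro rest
  induction rest with
  | nil => intro k seq fs a b _ _ _; simp [PySem.List.enumerate, pvPending]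
  | cons v tl ih =>
    intro k seq fs a b hinv hkn hk1
    rw [pvEnum_cons, List.foldl_cons]
    have hk0 : ¬ (k = 0) := by omega
    by_cases hbv : b + 1 = v
    · -- run continues
      have hinv' : pvInv (seq ++ [v]) a v := hbv ▸ pvInv_extend hinv
      by_cases htl : tl = []
      · subst htl
        have hkn1 : k = n - 1 := by simp at hkn; omega
        simp only [pvStepA, if_pos (Or.inl hbv), if_pos hkn1]
        simp [PySem.List.enumerate, pvPending, pvRunsGo, if_pos hbv,
              pvFlushA_eq hinv' digits]
      · have hkn1 : ¬ (k = n - 1) := by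
          simp at hkn
          have : 0 < tl.length := List.length_pos_iff.mpr htl
          omega
        simp only [pvStepA, if_pos (Or.inl hbv), if_neg hkn1]
        rw [ih (k + 1) (seq ++ [v]) fs a v hinv' (by simp at hkn ⊢; omega) (by omega)]
        simp [pvPending, pvRunsGo, if_pos hbv, htl]
    · -- run breaks
      have hcond : ¬ (b + 1 = v ∨ k = 0) := by tauto
      have hfl : pvFlushA seq digits = pvFmt digits (a, b) := pvFlushA_eq hinv digits
      by_cases htl : tl = []
      · subst htl
        have hkn1 : k = n - 1 := by simp at hkn; omega
        simp only [pvStepA, if_neg hcond, if_pos hkn1]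
        simp [PySem.List.enumerate, pvPending, pvRunsGo, if_neg hbv, hfl,
              pvFlushA_eq (pvInv_single v) digits]
      · have hkn1 : ¬ (k = n - 1) := by
          simp at hkn
          have : 0 < tl.length := List.length_pos_iff.mpr htl
          omega
        simp only [pvStepA, if_neg hcond, if_neg hkn1]
        rw [ih (k + 1) [v] (fs ++ [pvFlushA seq digits]) v v (pvInv_single v)
              (by simp at hkn ⊢; omega) (by omega)]
        simp [pvPending, pvRunsGo, if_neg hbv, htl, hfl]

-- A's whole loop on a nonempty list: the formatted runs
lemma pvLoopA_runs (digits : Int) (y0 : Int) (tl : List Int) :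
    ((PySem.List.enumerate (y0 :: tl)).foldl
        (pvStepA digits ((y0 :: tl).length : Int)) ([], [], 0)).2.1
      = (pvRunsGo y0 y0 tl).map (pvFmt digits) := by
  rw [pvEnum_cons, List.foldl_cons]
  have hstep1 : pvStepA digits (((y0 :: tl).length : Int)) ([], [], 0) (0, y0)
      = if (0 : Int) = ((y0 :: tl).length : Int) - 1 then
          ([y0], [pvFlushA [y0] digits], y0) else ([y0], [], y0) := by
    simp [pvStepA]
  rw [hstep1]
  by_cases htl : tl = []
  · subst htl
    simp [PySem.List.enumerate, pvRunsGo, pvFlushA_eq (pvInv_single y0) digits]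
  · have : ¬ ((0 : Int) = (((y0 :: tl).length : Int)) - 1) := by
      have : 0 < tl.length := List.length_pos_iff.mpr htl
      simp; omega
    rw [if_neg this, show (0:Int)+1 = 1 from rfl]
    rw [pvLoopA_go digits (((y0 :: tl).length : Int)) tl 1 [y0] [] y0 y0
          (pvInv_single y0) (by simp; omega) (by omega)]
    simp [pvPending, htl]

-- B's parts on a nonempty list: the same formatted runs
lemma pvPartsB_runs (digits : Int) (y0 : Int) (tl : List Int) :
    ((([PySem.List.pyGetD (y0 :: tl) 0 0] ++
        (((y0 :: tl).zip (PySem.List.slice (y0 :: tl) (some 1) none)).filter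
          (fun p => p.2 != p.1 + 1)).map Prod.snd).zip
      ((((y0 :: tl).zip (PySem.List.slice (y0 :: tl) (some 1) none)).filter
          (fun p => p.2 != p.1 + 1)).map Prod.fst ++
        [PySem.List.pyGetD (y0 :: tl) (-1) (0 : Int)])).map (pvFmt digits))
      = (pvRunsGo y0 y0 tl).map (pvFmt digits) := by
  have hslice : PySem.List.slice (y0 :: tl) (some 1) none = tl :=
    PySem.List.slice_from_one (y0 :: tl)
  have hget0 : PySem.List.pyGetD (y0 :: tl) 0 0 = y0 := by
    simp [PySem.List.pyGetD_zero_cons]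
  have hlast : PySem.List.pyGetD (y0 :: tl) (-1) (0 : Int) = pvLast y0 tl := by
    rw [PySem.List.pyGetD_neg_one (y0 :: tl) (0 : Int) (List.cons_ne_nil y0 tl)]
    exact pvLast_eq_getLast tl y0
  rw [hslice, hget0, hlast, pvZipFilter_eq_FB tl y0]
  have := pvZipRuns tl y0 y0
  rw [show ([y0] ++ (pvFB y0 tl).map Prod.snd : List Int)
        = y0 :: (pvFB y0 tl).map Prod.snd from rfl, this]

-- ===== VERDICT (by name: the statement is the Claim_ definition above) =====
theorem get_line_numbers_concat_spec : Claim_equal_get_line_numbers_concat := by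
  intro number_list digits _
  unfold Spec_get_line_numbers_concat get_line_numbers_concat get_line_numbers_concat_alt
  cases hys : PySem.List.sorted number_list (fun x => x) with
  | nil => simp [PySem.List.enumerate, PySem.Str.join]
  | cons y0 tl =>
    simp only [List.isEmpty_cons, Bool.false_eq_true, if_false]
    rw [pvLoopA_runs digits y0 tl, pvPartsB_runs digits y0 tl]
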